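-- pv_equiv track=rewrite | github.com/bored-town/op-airdrop4 | common.py | find_duplicates_ignore_case
-- ===== SOURCE A (Python) =====
-- def find_duplicates_ignore_case(lst):
--     seen = set()
--     duplicates = set()
--     for item in lst:
--         item_lower = item.lower()
--         if item_lower in seen:
--             duplicates.add(item_lower)
--         else:
--             seen.add(item_lower)
--     return duplicates
-- ===== SOURCE B (Python) =====
-- def find_duplicates_ignore_case(lst):
--     lows = [item.lower() for item in lst]
--     rest = list(lows)
--     for v in dict.fromkeys(lows):
--         rest.remove(v)
--     return set(rest)
-- ===== Notes on version B (the rewrite author's own statement) =====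
-- stated objective: alternative
-- what changed: Instead of tracking seen/duplicate sets with a membership test per item, B computes the multiset difference: it lowercases everything, deletes one copy of each distinct value (its first occurrence) from the list, and the leftover occurrences are exactly the duplicates.
import Mathlib
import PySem

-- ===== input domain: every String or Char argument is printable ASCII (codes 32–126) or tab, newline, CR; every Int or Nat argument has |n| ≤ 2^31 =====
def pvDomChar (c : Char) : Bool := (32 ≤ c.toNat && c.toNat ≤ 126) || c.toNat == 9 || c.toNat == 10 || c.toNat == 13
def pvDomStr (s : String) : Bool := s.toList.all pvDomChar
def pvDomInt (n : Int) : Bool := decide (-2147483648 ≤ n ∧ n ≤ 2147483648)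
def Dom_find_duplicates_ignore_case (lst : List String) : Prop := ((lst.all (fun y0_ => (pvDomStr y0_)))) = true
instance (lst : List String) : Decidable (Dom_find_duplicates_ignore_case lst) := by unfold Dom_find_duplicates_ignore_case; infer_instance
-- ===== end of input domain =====

-- B replaces A's seen/duplicates tracking by a multiset difference: lowercase all items,
-- remove one copy (the first occurrence) of each distinct value, and the leftovers are the
-- duplicates; an alternative decomposition, not faster.

-- ===== PORT A =====
def find_duplicates_ignore_case (lst : List String) : List String :=
  (lst.foldl
    (fun (st : PySem.Set String × PySem.Set String) item =>
      let item_lower := PySem.Str.lower item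
      if PySem.Set.contains st.1 item_lower then
        (st.1, PySem.Set.add st.2 item_lower)
      else
        (PySem.Set.add st.1 item_lower, st.2))
    (PySem.Set.empty, PySem.Set.empty)).2

-- ===== PORT B =====
-- rest.remove(v) never raises here (each distinct value is still present when its turn comes),
-- so the `.getD r` branch of remove? is unreachable; the port is exact.
def find_duplicates_ignore_case_alt (lst : List String) : List String :=
  let lows := lst.map PySem.Str.lower
  let rest :=
    (PySem.List.dedup lows).foldl (fun r v => (PySem.List.remove? r v).getD r) lows
  PySem.Set.ofList rest

-- ===== PRECONDITION & SPEC =====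
def Spec_find_duplicates_ignore_case (lst : List String) (out : List String) : Prop := out = find_duplicates_ignore_case_alt lst
instance (lst : List String) (out : List String) : Decidable (Spec_find_duplicates_ignore_case lst out) := by unfold Spec_find_duplicates_ignore_case; infer_instance

-- ===== CLAIM (what is proved, stated in full; the proofs are below) =====
def Claim_equal_find_duplicates_ignore_case : Prop := ∀ (lst : List String), Dom_find_duplicates_ignore_case lst → Spec_find_duplicates_ignore_case lst (find_duplicates_ignore_case lst)

-- ===== LEMMAS AND PROOFS =====

/-- The common reference: elements of `ls` whose value already occurs before them
    (`pre` = values already seen), in order of occurrence, repeats kept. -/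
def pvSecondOcc (pre : List String) : List String → List String
  | [] => []
  | x :: xs => (if x ∈ pre then [x] else []) ++ pvSecondOcc (pre ++ [x]) xs

theorem pvOfList_append_singleton (pre : List String) (x : String) :
    PySem.Set.ofList (pre ++ [x]) = PySem.Set.add (PySem.Set.ofList pre) x := by
  simp [PySem.Set.ofList_eq_foldl, List.foldl_append]

/-- A's loop, generalized: starting from seen = set(pre) and any duplicates accumulator. -/
theorem pvFoldA (ls pre dup : List String) :
    ls.foldl
      (fun (st : PySem.Set String × PySem.Set String) x =>
        if PySem.Set.contains st.1 x then (st.1, PySem.Set.add st.2 x)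
        else (PySem.Set.add st.1 x, st.2))
      (PySem.Set.ofList pre, dup)
    = (PySem.Set.ofList (pre ++ ls), PySem.Set.update dup (pvSecondOcc pre ls)) := by
  induction ls generalizing pre dup with
  | nil => simp [pvSecondOcc, PySem.Set.update]
  | cons x xs ih =>
    simp only [List.foldl_cons, pvSecondOcc]
    by_cases hx : x ∈ pre
    · have hc : PySem.Set.contains (PySem.Set.ofList pre) x = true := by
        rw [PySem.Set.contains_iff]; exact (PySem.Set.mem_ofList _ _).2 hx
      have hadd : PySem.Set.ofList (pre ++ [x]) = PySem.Set.ofList pre := by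
        rw [pvOfList_append_singleton, PySem.Set.add_of_mem ((PySem.Set.mem_ofList _ _).2 hx)]
      rw [if_pos hc]
      have := ih (pre ++ [x]) (PySem.Set.add dup x)
      rw [hadd] at this
      rw [this]
      simp [PySem.Set.update, hx, List.append_assoc]
    · have hc : PySem.Set.contains (PySem.Set.ofList pre) x = false := by
        rw [Bool.eq_false_iff]
        intro h; exact hx ((PySem.Set.mem_ofList _ _).1 ((PySem.Set.contains_iff _ _).1 h))
      rw [if_neg (by rw [hc]; exact Bool.false_ne_true)]
      have hadd : PySem.Set.add (PySem.Set.ofList pre) x = PySem.Set.ofList (pre ++ [x]) := by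
        rw [pvOfList_append_singleton]
      rw [hadd, ih (pre ++ [x]) dup]
      simp [hx, List.append_assoc]

/-- One step of B's loop is plain `List.erase` (remove? is some-erase when present, and
    erase is the identity when absent). -/
theorem pvRemoveD (r : List String) (v : String) :
    (PySem.List.remove? r v).getD r = r.erase v := by
  by_cases hv : v ∈ r
  · rw [PySem.List.remove?_eq_some_erase r v hv]; rfl
  · rw [(PySem.List.remove?_eq_none_iff r v).2 hv, List.erase_of_not_mem hv]; rfl

/-- `L` with the first occurrence of each value of `ds` removed, by a single scan. -/
def pvResidual (ds : List String) : List String → List String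
  | [] => []
  | x :: xs => if x ∈ ds then pvResidual (ds.erase x) xs else x :: pvResidual ds xs

theorem pvResidual_erase (xs : List String) : ∀ (ds : List String) (d : String), d ∉ ds →
    pvResidual ds (xs.erase d) = pvResidual (d :: ds) xs := by
  induction xs with
  | nil => intro ds d _; simp [pvResidual]
  | cons x xs ih =>
    intro ds d hd
    by_cases hxd : x = d
    · subst hxd
      rw [List.erase_cons_head]
      simp [pvResidual, List.erase_cons_head]
    · rw [List.erase_cons_tail (by simpa using hxd)]
      by_cases hx : x ∈ ds
      · have hx' : x ∈ d :: ds := List.mem_cons_of_mem _ hx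
        have hde : d ∉ ds.erase x := fun h => hd (List.mem_of_mem_erase h)
        have hcons : (d :: ds).erase x = d :: ds.erase x :=
          List.erase_cons_tail (by simpa using (Ne.symm hxd))
        simp only [pvResidual, if_pos hx, if_pos hx', hcons]
        exact ih (ds.erase x) d hde
      · have hx' : x ∉ d :: ds := by
          simp only [List.mem_cons]; rintro (h | h); exact hxd h; exact hx h
        simp only [pvResidual, if_neg hx, if_neg hx']
        rw [ih ds d hd]

theorem pvFoldB (ds : List String) : ∀ (L : List String), ds.Nodup →
    ds.foldl (fun r v => r.erase v) L = pvResidual ds L := by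
  induction ds with
  | nil =>
    intro L _
    induction L with
    | nil => simp [pvResidual]
    | cons x xs ihL =>
      simp only [List.foldl_nil] at ihL ⊢
      simp [pvResidual, ← ihL]
  | cons d ds ih =>
    intro L hnd
    rw [List.nodup_cons] at hnd
    simp only [List.foldl_cons]
    rw [ih (L.erase d) hnd.2, pvResidual_erase L ds d hnd.1]

theorem pvResidual_eq_secondOcc : ∀ (L D pre : List String), D.Nodup →
    (∀ x ∈ L, (x ∈ D ↔ x ∉ pre)) → pvResidual D L = pvSecondOcc pre L := by
  intro L
  induction L with
  | nil => intro D pre _ _; simp [pvResidual, pvSecondOcc]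
  | cons x xs ih =>
    intro D pre hnd hinv
    by_cases hx : x ∈ D
    · have hxpre : x ∉ pre := ((hinv x (List.mem_cons_self)).1 hx)
      simp only [pvResidual, if_pos hx, pvSecondOcc, if_neg hxpre, List.nil_append]
      refine ih (D.erase x) (pre ++ [x]) (List.Nodup.erase _ hnd) ?_
      intro y hy
      by_cases hyx : y = x
      · subst hyx
        constructor
        · intro h; exact absurd h (List.Nodup.not_mem_erase hnd)
        · intro h; exact absurd (by simp) h
      · rw [List.mem_erase_of_ne hyx]
        rw [hinv y (List.mem_cons_of_mem _ hy)]
        simp [hyx]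
    · have hxpre : x ∈ pre := by
        by_contra h; exact hx ((hinv x List.mem_cons_self).2 h)
      simp only [pvResidual, if_neg hx, pvSecondOcc, if_pos hxpre, List.singleton_append]
      refine congrArg (x :: ·) (ih D (pre ++ [x]) hnd ?_)
      intro y hy
      rw [hinv y (List.mem_cons_of_mem _ hy)]
      by_cases hyx : y = x
      · subst hyx; simp [hxpre]
      · simp [hyx]

-- ===== VERDICT (by name: the statement is the Claim_ definition above) =====
theorem find_duplicates_ignore_case_spec : Claim_equal_find_duplicates_ignore_case := by
  intro lst _
  unfold Spec_find_duplicates_ignore_case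
  set lows := lst.map PySem.Str.lower with hlows
  have hA : find_duplicates_ignore_case lst
      = PySem.Set.update [] (pvSecondOcc [] lows) := by
    unfold find_duplicates_ignore_case
    rw [show (fun (st : PySem.Set String × PySem.Set String) item =>
          let item_lower := PySem.Str.lower item
          if PySem.Set.contains st.1 item_lower then (st.1, PySem.Set.add st.2 item_lower)
          else (PySem.Set.add st.1 item_lower, st.2))
        = (fun (st : PySem.Set String × PySem.Set String) item =>
          if PySem.Set.contains st.1 (PySem.Str.lower item) then
            (st.1, PySem.Set.add st.2 (PySem.Str.lower item))
          else (PySem.Set.add st.1 (PySem.Str.lower item), st.2)) from rfl]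
    rw [← List.foldl_map (f := PySem.Str.lower)
          (g :=
          (fun (st : PySem.Set String × PySem.Set String) v =>
            if PySem.Set.contains st.1 v then (st.1, PySem.Set.add st.2 v)
            else (PySem.Set.add st.1 v, st.2)))
          (l := lst) (init := (PySem.Set.empty, PySem.Set.empty))]
    have h := pvFoldA lows [] []
    simp only [List.nil_append] at h
    rw [show (PySem.Set.empty (α := String), PySem.Set.empty (α := String))
          = (PySem.Set.ofList ([] : List String), ([] : List String)) from rfl, ← hlows, h]
  have hB : find_duplicates_ignore_case_alt lst
      = PySem.Set.ofList (pvSecondOcc [] lows) := by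
    show PySem.Set.ofList
        ((PySem.List.dedup (lst.map PySem.Str.lower)).foldl
          (fun r v => (PySem.List.remove? r v).getD r) (lst.map PySem.Str.lower))
      = PySem.Set.ofList (pvSecondOcc [] lows)
    simp only [pvRemoveD]
    rw [← hlows]
    rw [pvFoldB (PySem.List.dedup lows) lows (PySem.List.nodup_dedup lows)]
    rw [pvResidual_eq_secondOcc lows (PySem.List.dedup lows) [] (PySem.List.nodup_dedup lows)
      (by intro x hx; simp [hx])]
  rw [hA, hB]
  simp [PySem.Set.update, PySem.Set.ofList_eq_foldl]
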